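-- pv_equiv track=rewrite | github.com/PwnKit-Labs/noeris | src/research_engine/triton_kernels.py | _clamp_pow2
-- ===== SOURCE A (Python) =====
-- def _clamp_pow2(value: int, low: int, high: int) -> int:
--     """Clamp to nearest power of 2 within bounds."""
--     value = max(low, min(value, high))
--     # Round to nearest power of 2
--     p = 1
--     while p * 2 <= value:
--         p *= 2
--     if abs(p - value) > abs(p * 2 - value) and p * 2 <= high:
--         p *= 2
--     return max(low, min(p, high))
-- ===== SOURCE B (Python) =====
-- def _clamp_pow2(value: int, low: int, high: int) -> int:
--     """Clamp to nearest power of 2 within bounds (closed form, no loop)."""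
--     value = max(low, min(value, high))
--     p = 1 if value < 1 else 1 << (value.bit_length() - 1)
--     if abs(p - value) > abs(2 * p - value) and 2 * p <= high:
--         p = 2 * p
--     return max(low, min(p, high))
-- ===== Notes on version B (the rewrite author's own statement) =====
-- stated objective: faster
-- what changed: The doubling while-loop that finds the largest power of two <= value is replaced by a closed form via int.bit_length (1 << (bit_length-1)); clamp and rounding step unchanged.
import Mathlib
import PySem

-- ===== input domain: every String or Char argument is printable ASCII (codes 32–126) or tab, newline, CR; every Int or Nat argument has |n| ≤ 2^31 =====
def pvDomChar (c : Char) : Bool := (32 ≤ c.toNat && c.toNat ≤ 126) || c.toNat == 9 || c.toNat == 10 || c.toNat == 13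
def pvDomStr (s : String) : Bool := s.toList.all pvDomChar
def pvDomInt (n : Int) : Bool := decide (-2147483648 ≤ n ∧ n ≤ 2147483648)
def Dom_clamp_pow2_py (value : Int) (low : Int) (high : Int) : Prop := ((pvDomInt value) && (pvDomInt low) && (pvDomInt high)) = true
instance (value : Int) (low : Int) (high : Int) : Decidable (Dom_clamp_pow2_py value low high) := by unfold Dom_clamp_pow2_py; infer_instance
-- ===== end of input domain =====

-- B replaces A's doubling while-loop by a closed form via int.bit_length (objective: faster, O(1) loop-free).

-- ===== PORT A =====
-- 'while p * 2 <= value: p *= 2' (the '0 < p' conjunct is only a totality guard;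
-- it holds on every call reached from the initial p = 1)
def pvLoopA (value : Int) (p : Int) : Int :=
  if h : p * 2 ≤ value ∧ 0 < p then pvLoopA value (p * 2) else p
termination_by (value - p).toNat
decreasing_by omega

def clamp_pow2_py (value : Int) (low : Int) (high : Int) : Int :=
  let v := max low (min value high)
  let p := pvLoopA v 1
  let p := if |p - v| > |p * 2 - v| ∧ p * 2 ≤ high then p * 2 else p
  max low (min p high)

-- ===== PORT B =====
-- '1 << (v.bit_length() - 1)' for v ≥ 1 is exactly 2 ^ Nat.log2 v.toNat
def clamp_pow2_py_alt (value : Int) (low : Int) (high : Int) : Int :=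
  let v := max low (min value high)
  let p : Int := if v < 1 then 1 else 2 ^ Nat.log2 v.toNat
  let p := if |p - v| > |2 * p - v| ∧ 2 * p ≤ high then 2 * p else p
  max low (min p high)

-- ===== PRECONDITION & SPEC =====
def Spec_clamp_pow2_py (value : Int) (low : Int) (high : Int) (out : Int) : Prop := out = clamp_pow2_py_alt value low high
instance (value : Int) (low : Int) (high : Int) (out : Int) : Decidable (Spec_clamp_pow2_py value low high out) := by unfold Spec_clamp_pow2_py; infer_instance

-- ===== CLAIM (what is proved, stated in full; the proofs are below) =====
def Claim_equal_clamp_pow2_py : Prop := ∀ (value : Int) (low : Int) (high : Int), Dom_clamp_pow2_py value low high → Spec_clamp_pow2_py value low high (clamp_pow2_py value low high)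

-- ===== LEMMAS AND PROOFS =====

lemma pvLoopA_pow (n : Nat) : ∀ (v : Int) (k : Nat), v.toNat.log2 - k = n →
    (2:Int) ^ k ≤ v → pvLoopA v ((2:Int) ^ k) = (2:Int) ^ v.toNat.log2 := by
  induction n with
  | zero =>
    intro v k hn h
    have hposk : (0:Int) < 2 ^ k := by positivity
    have hv : 0 < v := lt_of_lt_of_le hposk h
    have hk : (2:Nat) ^ k ≤ v.toNat := by
      rw [Int.le_toNat (le_of_lt hv)]; push_cast; exact h
    have hkle : k ≤ v.toNat.log2 := (Nat.le_log2 (by omega)).mpr hk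
    have hcond : ¬((2:Int) ^ k * 2 ≤ v ∧ 0 < (2:Int) ^ k) := by
      rintro ⟨h1, -⟩
      have h2 : (2:Nat) ^ (k + 1) ≤ v.toNat := by
        rw [Int.le_toNat (le_of_lt hv)]; push_cast [pow_succ]; exact h1
      have := (Nat.le_log2 (by omega)).mpr h2
      omega
    rw [pvLoopA, dif_neg hcond]
    congr 1
    omega
  | succ n ih =>
    intro v k hn h
    have hposk : (0:Int) < 2 ^ k := by positivity
    have hv : 0 < v := lt_of_lt_of_le hposk h
    by_cases hc : (2:Int) ^ k * 2 ≤ v ∧ 0 < (2:Int) ^ k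
    · rw [pvLoopA, dif_pos hc]
      have hp : (2:Int) ^ k * 2 = 2 ^ (k + 1) := by ring
      rw [hp]
      have h1 : (2:Int) ^ (k + 1) ≤ v := by rw [← hp]; exact hc.1
      have h2 : (2:Nat) ^ (k + 1) ≤ v.toNat := by
        rw [Int.le_toNat (le_of_lt hv)]; push_cast; exact h1
      have := (Nat.le_log2 (by omega)).mpr h2
      exact ih v (k + 1) (by omega) h1
    · exfalso
      -- ¬cond means v < 2^(k+1), forcing v.toNat.log2 = k, contradicting hn
      have h1 : ¬((2:Int) ^ k * 2 ≤ v) := by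
        intro hle; exact hc ⟨hle, hposk⟩
      have hlt : v.toNat < (2:Nat) ^ (k + 1) := by
        by_contra hge
        push Not at hge
        apply h1
        have : ((2:Nat) ^ (k + 1) : Int) ≤ (v.toNat : Int) := by exact_mod_cast hge
        rw [Int.toNat_of_nonneg (le_of_lt hv)] at this
        calc (2:Int) ^ k * 2 = 2 ^ (k + 1) := by ring
          _ = ((2:Nat) ^ (k + 1) : Int) := by push_cast; ring
          _ ≤ v := this
      have hk : (2:Nat) ^ k ≤ v.toNat := by
        rw [Int.le_toNat (le_of_lt hv)]; push_cast; exact h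
      have hkle : k ≤ v.toNat.log2 := (Nat.le_log2 (by omega)).mpr hk
      have hself : (2:Nat) ^ v.toNat.log2 ≤ v.toNat := Nat.log2_self_le (by omega)
      have : (2:Nat) ^ (k + 1) ≤ 2 ^ v.toNat.log2 :=
        Nat.pow_le_pow_right (by omega) (by omega)
      omega

lemma pvLoopA_closed (v : Int) :
    pvLoopA v 1 = if v < 1 then 1 else (2:Int) ^ v.toNat.log2 := by
  by_cases hv : v < 1
  · rw [pvLoopA, dif_neg (by omega), if_pos hv]
  · rw [if_neg hv]
    have h1 : (2:Int) ^ (0:Nat) ≤ v := by norm_num; omega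
    have := pvLoopA_pow (v.toNat.log2 - 0) v 0 rfl h1
    simpa using this

-- ===== VERDICT (by name: the statement is the Claim_ definition above) =====
theorem clamp_pow2_py_spec : Claim_equal_clamp_pow2_py := by
  intro value low high _
  unfold Spec_clamp_pow2_py clamp_pow2_py clamp_pow2_py_alt
  simp only [pvLoopA_closed]
  set v := max low (min value high) with hv
  set p : Int := if v < 1 then 1 else (2:Int) ^ v.toNat.log2 with hp
  rw [mul_comm p 2]
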